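-- pv_equiv track=rewrite | github.com/i960107/algorithm-study | soohyun/week5/2n타일링.py | solution
-- ===== SOURCE A (Python) =====
-- def solution(n: int) -> int:
--     if n <= 2:
--         return n
--     dp = [0] * (n + 1)
--     dp[1] = 1
--     dp[2] = 2
--     k = 2
--     while k < n:
--         k += 1
--         dp[k] = dp[k - 2] + dp[k - 1]
--     return dp[n] % 10007
-- ===== SOURCE B (Python) =====
-- MOD = 10007
--
-- def solution(n: int) -> int:
--     if n <= 2:
--         return n
--     # fast doubling: fib(m) with fib(1)=fib(2)=1; answer = fib(n+1) % MOD
--     def fd(m):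
--         # returns (fib(m) % MOD, fib(m+1) % MOD)
--         if m == 0:
--             return (0, 1)
--         a, b = fd(m // 2)
--         c = a * (2 * b + MOD - a) % MOD
--         d = (a * a + b * b) % MOD
--         if m % 2 == 0:
--             return (c, d)
--         return (d, (c + d) % MOD)
--     return fd(n + 1)[0]
-- ===== Notes on version B (the rewrite author's own statement) =====
-- stated objective: faster
-- what changed: Replaces the O(n) DP table with fast-doubling Fibonacci computed mod 10007 (dp[n] = fib(n+1)), O(log n) time and O(1) numbers.
import Mathlib
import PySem

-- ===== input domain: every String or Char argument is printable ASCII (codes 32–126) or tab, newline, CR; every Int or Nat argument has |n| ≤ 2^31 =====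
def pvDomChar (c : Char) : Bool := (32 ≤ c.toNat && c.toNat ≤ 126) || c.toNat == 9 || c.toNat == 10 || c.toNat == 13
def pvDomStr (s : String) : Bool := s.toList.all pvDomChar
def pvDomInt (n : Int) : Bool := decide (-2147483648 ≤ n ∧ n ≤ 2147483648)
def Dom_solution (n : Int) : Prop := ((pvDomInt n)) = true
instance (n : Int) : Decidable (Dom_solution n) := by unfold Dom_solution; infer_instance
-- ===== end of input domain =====

-- B replaces A's O(n) DP table by fast-doubling Fibonacci mod 10007 (dp[n] = fib(n+1)), O(log n).

-- ===== PORT A =====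
-- A's while loop: Python does k += 1 then dp[k] = dp[k-2] + dp[k-1]; fuel = n - k counts the
-- remaining iterations; all list indices are in range throughout (proved below), ported with getD/set.
def loopA (fuel : Nat) (dp : List Int) (k : Nat) : List Int :=
  match fuel with
  | 0 => dp
  | f + 1 => loopA f (dp.set (k + 1) (dp.getD (k - 1) 0 + dp.getD k 0)) (k + 1)

def solution (n : Int) : Int :=
  if n ≤ 2 then n
  else
    let N := n.toNat
    let dp := ((List.replicate (N + 1) (0 : Int)).set 1 1).set 2 2
    PySem.Int.mod ((loopA (N - 2) dp 2).getD N 0) 10007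

-- ===== PORT B =====
-- fast doubling, transliteration of Source B's fd: fdB m = (fib m % 10007, fib (m+1) % 10007);
-- all intermediate values are nonnegative, so Python's % is Int's % (emod) here.
def fdB (m : Nat) : Int × Int :=
  if m = 0 then (0, 1)
  else
    let p := fdB (m / 2)
    let a := p.1
    let b := p.2
    let c := a * (2 * b + 10007 - a) % 10007
    let d := (a * a + b * b) % 10007
    if m % 2 = 0 then (c, d) else (d, (c + d) % 10007)
decreasing_by exact Nat.div_lt_self (Nat.pos_of_ne_zero (by assumption)) (by omega)

def solution_alt (n : Int) : Int :=
  if n ≤ 2 then n else (fdB (n.toNat + 1)).1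

-- ===== PRECONDITION & SPEC =====
def Spec_solution (n : Int) (out : Int) : Prop := out = solution_alt n
instance (n : Int) (out : Int) : Decidable (Spec_solution n out) := by unfold Spec_solution; infer_instance

-- ===== CLAIM (what is proved, stated in full; the proofs are below) =====
def Claim_equal_solution : Prop := ∀ (n : Int), Dom_solution n → Spec_solution n (solution n)

-- ===== LEMMAS AND PROOFS =====

lemma fib2q_cast (q : Nat) :
    (Nat.fib (2 * q) : Int) = (Nat.fib q : Int) * (2 * (Nat.fib (q + 1) : Int) - (Nat.fib q : Int)) := by
  have h : Nat.fib q ≤ 2 * Nat.fib (q + 1) := by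
    have := Nat.fib_le_fib_succ (n := q); omega
  rw [Nat.fib_two_mul]
  push_cast [h]
  ring

lemma c_fib (q : Nat) :
    ((Nat.fib q % 10007 : Nat) : Int) *
        (2 * ((Nat.fib (q + 1) % 10007 : Nat) : Int) + 10007 - ((Nat.fib q % 10007 : Nat) : Int)) % 10007
      = ((Nat.fib (2 * q) % 10007 : Nat) : Int) := by
  push_cast
  have h1 : (Nat.fib q : Int) % 10007 ≡ (Nat.fib q : Int) [ZMOD 10007] :=
    Int.emod_emod_of_dvd _ dvd_rfl
  have h2 : (Nat.fib (q + 1) : Int) % 10007 ≡ (Nat.fib (q + 1) : Int) [ZMOD 10007] :=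
    Int.emod_emod_of_dvd _ dvd_rfl
  have hM : (10007 : Int) ≡ 0 [ZMOD 10007] := by decide
  have key : ((Nat.fib q : Int) % 10007) *
      (2 * ((Nat.fib (q + 1) : Int) % 10007) + 10007 - (Nat.fib q : Int) % 10007) % 10007
      = ((Nat.fib q : Int) * (2 * (Nat.fib (q + 1) : Int) + 0 - (Nat.fib q : Int))) % 10007 :=
    h1.mul (((h2.mul_left 2).add hM).sub h1)
  rw [key, fib2q_cast q]
  norm_num

lemma d_fib (q : Nat) :
    (((Nat.fib q % 10007 : Nat) : Int) * ((Nat.fib q % 10007 : Nat) : Int) +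
        ((Nat.fib (q + 1) % 10007 : Nat) : Int) * ((Nat.fib (q + 1) % 10007 : Nat) : Int)) % 10007
      = ((Nat.fib (2 * q + 1) % 10007 : Nat) : Int) := by
  push_cast
  have h1 : (Nat.fib q : Int) % 10007 ≡ (Nat.fib q : Int) [ZMOD 10007] :=
    Int.emod_emod_of_dvd _ dvd_rfl
  have h2 : (Nat.fib (q + 1) : Int) % 10007 ≡ (Nat.fib (q + 1) : Int) [ZMOD 10007] :=
    Int.emod_emod_of_dvd _ dvd_rfl
  have key : (((Nat.fib q : Int) % 10007) * ((Nat.fib q : Int) % 10007) +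
      ((Nat.fib (q + 1) : Int) % 10007) * ((Nat.fib (q + 1) : Int) % 10007)) % 10007
      = ((Nat.fib q : Int) * (Nat.fib q : Int) +
         (Nat.fib (q + 1) : Int) * (Nat.fib (q + 1) : Int)) % 10007 :=
    (h1.mul h1).add (h2.mul h2)
  rw [key, Nat.fib_two_mul_add_one]
  push_cast
  congr 1
  ring

lemma sum_fib (q : Nat) :
    (((Nat.fib (2 * q) % 10007 : Nat) : Int) + ((Nat.fib (2 * q + 1) % 10007 : Nat) : Int)) % 10007
      = ((Nat.fib (2 * q + 2) % 10007 : Nat) : Int) := by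
  push_cast
  have h1 : (Nat.fib (2 * q) : Int) % 10007 ≡ (Nat.fib (2 * q) : Int) [ZMOD 10007] :=
    Int.emod_emod_of_dvd _ dvd_rfl
  have h2 : (Nat.fib (2 * q + 1) : Int) % 10007 ≡ (Nat.fib (2 * q + 1) : Int) [ZMOD 10007] :=
    Int.emod_emod_of_dvd _ dvd_rfl
  have key := h1.add h2
  rw [key, Nat.fib_add_two]
  push_cast
  ring_nf

lemma fdB_spec (m : Nat) :
    fdB m = (((Nat.fib m % 10007 : Nat) : Int), ((Nat.fib (m + 1) % 10007 : Nat) : Int)) := by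
  induction m using Nat.strong_induction_on with
  | _ m ih =>
    rw [fdB]
    by_cases h0 : m = 0
    · simp [h0]
    · simp only [h0, if_false]
      rw [ih (m / 2) (Nat.div_lt_self (Nat.pos_of_ne_zero h0) (by omega))]
      by_cases hm : m % 2 = 0
      · rw [if_pos hm]
        rw [c_fib (m / 2), d_fib (m / 2), show 2 * (m / 2) = m by omega]
      · rw [if_neg hm]
        rw [c_fib (m / 2), d_fib (m / 2), sum_fib (m / 2),
          show 2 * (m / 2) + 2 = m + 1 by omega, show 2 * (m / 2) + 1 = m by omega]

-- dp-table loop invariant for A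
lemma loopA_spec (fuel : Nat) : ∀ (dp : List Int) (k : Nat), 1 ≤ k → k + fuel < dp.length →
    dp.getD (k - 1) 0 = (Nat.fib k : Int) → dp.getD k 0 = (Nat.fib (k + 1) : Int) →
    (loopA fuel dp k).getD (k + fuel) 0 = (Nat.fib (k + fuel + 1) : Int) := by
  induction fuel with
  | zero => intro dp k _ _ _ h2; simpa using h2
  | succ f ih =>
    intro dp k hk hlen h1 h2
    rw [loopA]
    have hlen' : (dp.set (k + 1) (dp.getD (k - 1) 0 + dp.getD k 0)).length = dp.length := by
      simp
    have hne : k + 1 ≠ k := by omega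
    have hklt : k + 1 < dp.length := by omega
    have e1 : (dp.set (k + 1) (dp.getD (k - 1) 0 + dp.getD k 0)).getD k 0 = dp.getD k 0 := by
      simp [List.getD_eq_getElem?_getD, List.getElem?_set_ne hne]
    have e2 : (dp.set (k + 1) (dp.getD (k - 1) 0 + dp.getD k 0)).getD (k + 1) 0
        = (Nat.fib (k + 2) : Int) := by
      rw [List.getD_eq_getElem?_getD, List.getElem?_set_self (by omega)]
      simp only [Option.getD_some]
      rw [h1, h2, Nat.fib_add_two]
      push_cast; ring
    have e1' : (dp.set (k + 1) (dp.getD (k - 1) 0 + dp.getD k 0)).getD k 0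
        = (Nat.fib (k + 1) : Int) := e1.trans h2
    have := ih (dp.set (k + 1) (dp.getD (k - 1) 0 + dp.getD k 0)) (k + 1) (by omega)
      (by rw [hlen']; omega)
      (by simpa using e1')
      (by simpa using e2)
    have harith : k + 1 + f = k + (f + 1) := by omega
    rw [harith] at this
    rw [this]

theorem solution_spec : Claim_equal_solution := by
  intro n _
  unfold Spec_solution solution solution_alt
  by_cases hn : n ≤ 2
  · simp [hn]
  · simp only [hn, if_false]
    have hN : 3 ≤ n.toNat := by omega
    set N := n.toNat with hNdef
    have hdp1 : (((List.replicate (N + 1) (0 : Int)).set 1 1).set 2 2).getD 1 0 = (Nat.fib 2 : Int) := by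
      rw [List.getD_eq_getElem?_getD, List.getElem?_set_ne (by omega)]
      rw [List.getElem?_set_self (by simp; omega)]
      simp
    have hdp2 : (((List.replicate (N + 1) (0 : Int)).set 1 1).set 2 2).getD 2 0 = (Nat.fib 3 : Int) := by
      rw [List.getD_eq_getElem?_getD, List.getElem?_set_self (by simp; omega)]
      simp [Nat.fib]
    have hlen : 2 + (N - 2) < (((List.replicate (N + 1) (0 : Int)).set 1 1).set 2 2).length := by
      simp; omega
    have hloop := loopA_spec (N - 2) (((List.replicate (N + 1) (0 : Int)).set 1 1).set 2 2) 2
      (by omega) hlen (by simpa using hdp1) hdp2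
    have hNN : 2 + (N - 2) = N := by omega
    rw [hNN] at hloop
    rw [hloop]
    rw [PySem.Int.mod_eq_emod_of_pos (by omega)]
    rw [fdB_spec (N + 1)]
    dsimp only
    push_cast
    rfl
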